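-- pv_equiv track=rewrite | github.com/smehan/AOC | aoc_2017/d3.py | distance_midpoint
-- ===== SOURCE A (Python) =====
-- def distance_midpoint(p, n):
--     """each side is 2n-1 """
--     # special case of center of grid
--     if n == 1:
--         return n
--     side = (2*n+1)
--     start = side**2
--     values = []
--     for i in range(1,4,1):
--         top = start-side*(i-1)
--         bottom = top - side
--         values = list(range(top, bottom, -1))
--         if p in values:
--             mid = values[round(len(values)/2)]
--             return mid-p+n
-- ===== SOURCE B (Python) =====
-- def distance_midpoint(p, n):
--     """each side is 2n-1 """
--     # special case of center of grid
--     if n == 1: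
--         return 1
--     side = 2 * n + 1
--     start = side * side
--     # the three sides covered run over (start - 3*side, start]
--     if start - 3 * side < p <= start:
--         top = start - side * ((start - p) // side)
--         mid = top - round(side / 2)
--         return mid - p + n
-- ===== Notes on version B (the rewrite author's own statement) =====
-- stated objective: faster
-- what changed: Replaces the loop that builds each spiral side as an explicit list (and scans it for membership and a midpoint index) by a constant-time interval test and a direct floor-division/midpoint formula.
import Mathlib
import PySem

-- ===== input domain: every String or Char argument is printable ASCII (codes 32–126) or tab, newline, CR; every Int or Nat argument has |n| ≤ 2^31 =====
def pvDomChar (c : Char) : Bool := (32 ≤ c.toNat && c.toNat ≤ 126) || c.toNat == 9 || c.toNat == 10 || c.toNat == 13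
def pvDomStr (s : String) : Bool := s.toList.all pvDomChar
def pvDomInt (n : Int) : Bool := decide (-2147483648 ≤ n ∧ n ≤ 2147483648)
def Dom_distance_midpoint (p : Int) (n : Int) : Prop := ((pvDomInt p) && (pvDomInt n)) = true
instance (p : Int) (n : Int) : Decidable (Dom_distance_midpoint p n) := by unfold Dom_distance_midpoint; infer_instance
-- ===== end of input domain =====

-- B replaces A's per-side list construction and scans by a constant-time interval test and midpoint formula (objective: faster).


-- ===== PORT A =====
-- Python round(m/2) for a nonnegative int m: exact float halving then banker's rounding; exact for m < 2^53
def pvRoundHalf (m : Nat) : Nat :=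
  if m % 2 == 0 then m / 2
  else if (m / 2) % 2 == 0 then m / 2 else m / 2 + 1

def pvLoopA (p n side start : Int) : List Int → Option Int
  | [] => none
  | i :: rest =>
      let top := start - side * (i - 1)
      let bottom := top - side
      let values := PySem.List.pyRange top bottom (-1)
      if p ∈ values then
        (PySem.List.pyGet? values ((pvRoundHalf values.length : Nat) : Int)).map
          (fun mid => mid - p + n)
      else pvLoopA p n side start rest

def distance_midpoint (p : Int) (n : Int) : Option Int :=
  if n == 1 then some n
  else pvLoopA p n (2 * n + 1) ((2 * n + 1) ^ 2) (PySem.List.pyRange 1 4 1)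

-- ===== PORT B =====
def distance_midpoint_alt (p : Int) (n : Int) : Option Int :=
  if n == 1 then some 1
  else
    let side := 2 * n + 1
    let start := side * side
    if start - 3 * side < p ∧ p ≤ start then
      let top := start - side * PySem.Int.floordiv (start - p) side
      -- round(side / 2): side is positive (and odd) whenever this branch is reached, so toNat is exact
      let mid := top - (pvRoundHalf side.toNat : Int)
      some (mid - p + n)
    else none

-- ===== PRECONDITION & SPEC =====
def Spec_distance_midpoint (p : Int) (n : Int) (out : Option Int) : Prop := out = distance_midpoint_alt p n
instance (p : Int) (n : Int) (out : Option Int) : Decidable (Spec_distance_midpoint p n out) := by unfold Spec_distance_midpoint; infer_instance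

-- ===== CLAIM (what is proved, stated in full; the proofs are below) =====
def Claim_equal_distance_midpoint : Prop := ∀ (p : Int) (n : Int), Dom_distance_midpoint p n → Spec_distance_midpoint p n (distance_midpoint p n)

-- ===== LEMMAS AND PROOFS =====
theorem pvRoundHalf_odd (m : Nat) : pvRoundHalf (2 * m + 1) = if m % 2 = 0 then m else m + 1 := by
  have h1 : (2 * m + 1) % 2 = 1 := by omega
  have h2 : (2 * m + 1) / 2 = m := by omega
  simp [pvRoundHalf, h1, h2]

theorem pvLoopA_none_of_nonpos (p n side start : Int) (hs : side ≤ 0) (xs : List Int) :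
    pvLoopA p n side start xs = none := by
  induction xs with
  | nil => rfl
  | cons i rest ih =>
      simp only [pvLoopA]
      rw [PySem.List.pyRange_neg_one_eq_nil (by omega)]
      simpa using ih

theorem pvGet_countdown (a b k : Int) (h0 : 0 ≤ k) (h : k < a - b) :
    PySem.List.pyGet? (PySem.List.pyRange a b (-1)) k = some (a - k) := by
  rw [PySem.List.pyGet?_of_nonneg _ h0, PySem.List.pyRange_neg_one]
  have hk : k.toNat < (a - b).toNat := by omega
  simp [hk]
  omega

theorem pvStep_miss (p n side start i : Int) (rest : List Int)
    (h : ¬ (start - side * (i - 1) - side < p ∧ p ≤ start - side * (i - 1))) :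
    pvLoopA p n side start (i :: rest) = pvLoopA p n side start rest := by
  simp only [pvLoopA]
  rw [if_neg]
  intro hm
  exact h (by simpa [PySem.List.mem_pyRange_neg_one] using hm)

theorem pvStep_hit (p n side start i : Int) (rest : List Int) (hn : 0 ≤ n) (hside : side = 2 * n + 1)
    (h : start - side * (i - 1) - side < p ∧ p ≤ start - side * (i - 1)) :
    pvLoopA p n side start (i :: rest) =
      some (start - side * (i - 1) - (if n % 2 = 0 then n else n + 1) - p + n) := by
  simp only [pvLoopA]
  rw [if_pos (by simpa [PySem.List.mem_pyRange_neg_one] using h)]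
  rw [PySem.List.length_pyRange_neg_one]
  have hlen : (start - side * (i - 1) - (start - side * (i - 1) - side)).toNat = 2 * n.toNat + 1 := by
    omega
  rw [hlen, pvRoundHalf_odd]
  have hcast : (((if n.toNat % 2 = 0 then n.toNat else n.toNat + 1) : Nat) : Int)
      = (if n % 2 = 0 then n else n + 1) := by
    by_cases he : n % 2 = 0
    · rw [if_pos he, if_pos (by omega)]; omega
    · rw [if_neg he, if_neg (by omega)]; omega
  rw [hcast, pvGet_countdown _ _ _ (by split <;> omega) (by split <;> omega)]
  simp

theorem pvRoundSide (n : Int) (hn : 0 ≤ n) :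
    ((pvRoundHalf (2 * n + 1).toNat : Nat) : Int) = (if n % 2 = 0 then n else n + 1) := by
  have h : (2 * n + 1).toNat = 2 * n.toNat + 1 := by omega
  rw [h, pvRoundHalf_odd]
  by_cases he : n % 2 = 0
  · rw [if_pos (by omega), if_pos he]; omega
  · rw [if_neg (by omega), if_neg he]; omega

theorem pv_main : ∀ (p n : Int), distance_midpoint p n = distance_midpoint_alt p n := by
  intro p n
  unfold distance_midpoint distance_midpoint_alt
  by_cases h1 : n = 1
  · simp [h1]
  rw [if_neg (by simpa using h1), if_neg (by simpa using h1)]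
  by_cases hneg : n < 0
  · rw [pvLoopA_none_of_nonpos _ _ _ _ (by omega), if_neg]
    intro hc
    have hs : 2 * n + 1 ≤ -1 := by omega
    obtain ⟨hl, hr⟩ := hc
    omega
  have hn : 0 ≤ n := by omega
  have hrange : PySem.List.pyRange 1 4 1 = [1, 2, 3] := by decide
  rw [hrange]
  have hp2 : (2 * n + 1) ^ 2 = (2 * n + 1) * (2 * n + 1) := by ring
  rw [hp2]
  change pvLoopA p n (2 * n + 1) ((2 * n + 1) * (2 * n + 1)) [1, 2, 3] =
    if (2 * n + 1) * (2 * n + 1) - 3 * (2 * n + 1) < p ∧ p ≤ (2 * n + 1) * (2 * n + 1) then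
      some ((2 * n + 1) * (2 * n + 1)
          - (2 * n + 1) * PySem.Int.floordiv ((2 * n + 1) * (2 * n + 1) - p) (2 * n + 1)
          - ((pvRoundHalf (2 * n + 1).toNat : Nat) : Int) - p + n)
    else none
  rw [pvRoundSide n hn]
  set side := 2 * n + 1 with hside
  have hs : 0 < side := by omega
  set start := side * side with hstart
  clear_value side start
  by_cases hc : start - 3 * side < p ∧ p ≤ start
  · rw [if_pos hc]
    have hfd : ∀ q : Int, q * side ≤ start - p → start - p < (q + 1) * side →
        PySem.Int.floordiv (start - p) side = q := by
      intro q hq1 hq2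
      rw [PySem.Int.floordiv_eq_iff_of_pos hs]
      exact ⟨hq1, hq2⟩
    by_cases hm1 : start - side * (1 - 1) - side < p ∧ p ≤ start - side * (1 - 1)
    · rw [pvStep_hit p n side start 1 _ hn hside hm1, hfd 0 (by omega) (by omega)]; norm_num
    · rw [pvStep_miss p n side start 1 _ hm1]
      by_cases hm2 : start - side * (2 - 1) - side < p ∧ p ≤ start - side * (2 - 1)
      · rw [pvStep_hit p n side start 2 _ hn hside hm2, hfd 1 (by omega) (by omega)]; norm_num
      · rw [pvStep_miss p n side start 2 _ hm2]
        have hm3 : start - side * (3 - 1) - side < p ∧ p ≤ start - side * (3 - 1) := by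
          constructor <;> omega
        rw [pvStep_hit p n side start 3 _ hn hside hm3, hfd 2 (by omega) (by omega)]; norm_num
  · rw [if_neg hc]
    have hm' : ∀ i : Int, 0 ≤ i - 1 → i - 1 ≤ 2 →
        ¬ (start - side * (i - 1) - side < p ∧ p ≤ start - side * (i - 1)) := by
      intro i hi1 hi2 hmi
      have h1 : start - side * (i - 1) ≤ start := by nlinarith
      have h2 : start - 3 * side ≤ start - side * (i - 1) - side := by nlinarith
      exact hc ⟨by omega, by omega⟩
    rw [pvStep_miss p n side start 1 _ (hm' 1 (by omega) (by omega)),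
        pvStep_miss p n side start 2 _ (hm' 2 (by omega) (by omega)),
        pvStep_miss p n side start 3 _ (hm' 3 (by omega) (by omega))]
    rfl

-- ===== VERDICT (by name: the statement is the Claim_ definition above) =====
theorem distance_midpoint_spec : Claim_equal_distance_midpoint := by
  intro p n _
  unfold Spec_distance_midpoint
  exact pv_main p n
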